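-- pv_equiv track=rewrite | github.com/Gabriel-D-Silva/minimizador-afd | util.py | agruparEstadosComuns
-- ===== SOURCE A (Python) =====
-- def agruparEstadosComuns(lista_de_listas):
--     grupos = []
--
--     for sublista in lista_de_listas:
--         sublista_set = set(sublista)
--         grupo_atual = []
--
--         for grupo in grupos:
--             if sublista_set & grupo:  # interseção não vazia
--                 sublista_set |= grupo  # união
--             else:
--                 grupo_atual.append(grupo)
--
--         grupo_atual.append(sublista_set)
--         grupos = grupo_atual
--
--     # Converter para listas ordenadas
--     return [sorted(list(grupo)) for grupo in grupos]
-- ===== SOURCE B (Python) =====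
-- def agruparEstadosComuns(lista_de_listas):
--     # Indexed merging with union-by-size: comp maps element -> group id, so each
--     # sublist touches only the groups it intersects; smaller groups are merged
--     # into the largest one, so each element is relabelled O(log n) times.
--     comp = {}    # element -> group id
--     groups = {}  # group id -> set of elements; dict order = output order
--
--     for i, sublista in enumerate(lista_de_listas):
--         gids = list(dict.fromkeys(comp[x] for x in sublista if x in comp))
--         if gids:
--             big = max(gids, key=lambda g: len(groups[g]))
--         else:
--             big = i
--         merged = groups.pop(big, set())
--         for gid in gids:
--             if gid != big:
--                 parte = groups.pop(gid)
--                 for x in parte: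
--                     comp[x] = big
--                 merged |= parte
--         for x in sublista:
--             if x not in merged:
--                 comp[x] = big
--                 merged.add(x)
--         groups[big] = merged
--
--     return [sorted(grupo) for grupo in groups.values()]
-- ===== Notes on version B (the rewrite author's own statement) =====
-- stated objective: alternative
-- what changed: Replaces A's per-sublist scan over every existing group (set-intersection test against each) by an element-to-group-id dictionary index with union-by-size merging, so each sublist touches only the groups it actually intersects and only smaller groups are relabelled.
import Mathlib
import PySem

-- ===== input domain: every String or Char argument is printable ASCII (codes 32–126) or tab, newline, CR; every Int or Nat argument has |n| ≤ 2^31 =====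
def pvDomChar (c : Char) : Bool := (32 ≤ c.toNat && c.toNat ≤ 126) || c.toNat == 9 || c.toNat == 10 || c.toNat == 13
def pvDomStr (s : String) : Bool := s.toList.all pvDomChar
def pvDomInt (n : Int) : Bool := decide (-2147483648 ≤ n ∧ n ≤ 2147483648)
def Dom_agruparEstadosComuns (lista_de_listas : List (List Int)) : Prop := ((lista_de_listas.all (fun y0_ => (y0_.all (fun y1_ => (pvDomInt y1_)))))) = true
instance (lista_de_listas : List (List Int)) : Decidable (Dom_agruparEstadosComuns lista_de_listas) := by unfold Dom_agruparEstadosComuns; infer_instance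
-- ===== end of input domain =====

-- B replaces A's scan of every existing group per sublist by an element→group-id
-- dictionary index with union-by-size merging — a different algorithm, same return value.

-- ===== PORT A =====
-- body of A's outer loop: scan all groups, absorbing every group meeting sublista
def stepA (grupos : List (PySem.Set Int)) (sublista : List Int) : List (PySem.Set Int) :=
  let st :=
    grupos.foldl
      (fun (st : PySem.Set Int × List (PySem.Set Int)) grupo =>
        if PySem.Set.inter st.1 grupo ≠ [] then      -- interseção não vazia
          (PySem.Set.union st.1 grupo, st.2)         -- união
        else
          (st.1, st.2 ++ [grupo]))
      (PySem.Set.ofList sublista, [])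
  st.2 ++ [st.1]

def agruparEstadosComuns (lista_de_listas : List (List Int)) : List (List Int) :=
  let grupos := lista_de_listas.foldl stepA []
  grupos.map (fun grupo => PySem.List.sorted grupo (fun x => x) false)

-- ===== PORT B =====
-- body of B's loop: look the sublist's elements up in comp, pop exactly the touched
-- groups, merge into the largest one's id, relabel only the smaller parts
def stepB (st : PySem.Dict Int Int × PySem.Dict Int (PySem.Set Int)) (p : Int × List Int) :
    PySem.Dict Int Int × PySem.Dict Int (PySem.Set Int) :=
  let comp := st.1
  let groups := st.2
  let gids := PySem.List.dedup (p.2.filterMap (fun x => comp.get? x))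
  let big := if gids ≠ [] then
      PySem.List.maxD gids (fun g => ((groups.getD g PySem.Set.empty).length : Int)) 0
    else p.1
  let merged := groups.getD big PySem.Set.empty          -- groups.pop(big, set())
  let groups := groups.erase big
  let q :=
    gids.foldl
      (fun (q : PySem.Dict Int Int × PySem.Dict Int (PySem.Set Int) × PySem.Set Int) gid =>
        if gid = big then q
        else
          let parte := q.2.1.getD gid PySem.Set.empty    -- groups.pop(gid)
          (parte.foldl (fun c x => c.insert x big) q.1,
           q.2.1.erase gid,
           PySem.Set.union q.2.2 parte))
      (comp, groups, merged)
  let r :=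
    p.2.foldl
      (fun (r : PySem.Dict Int Int × PySem.Set Int) x =>
        if PySem.Set.contains r.2 x then r
        else (r.1.insert x big, PySem.Set.add r.2 x))
      (q.1, q.2.2)
  (r.1, q.2.1.insert big r.2)

def agruparEstadosComuns_alt (lista_de_listas : List (List Int)) : List (List Int) :=
  let fin := (PySem.List.enumerate lista_de_listas).foldl stepB (PySem.Dict.empty, PySem.Dict.empty)
  fin.2.values.map (fun grupo => PySem.List.sorted grupo (fun x => x) false)

-- ===== PRECONDITION & SPEC =====
def Spec_agruparEstadosComuns (lista_de_listas : List (List Int)) (out : List (List Int)) : Prop := out = agruparEstadosComuns_alt lista_de_listas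
instance (lista_de_listas : List (List Int)) (out : List (List Int)) : Decidable (Spec_agruparEstadosComuns lista_de_listas out) := by unfold Spec_agruparEstadosComuns; infer_instance

-- ===== CLAIM (what is proved, stated in full; the proofs are below) =====
def Claim_equal_agruparEstadosComuns : Prop := ∀ (lista_de_listas : List (List Int)), Dom_agruparEstadosComuns lista_de_listas → Spec_agruparEstadosComuns lista_de_listas (agruparEstadosComuns lista_de_listas)

-- ===== LEMMAS AND PROOFS =====

-- relation between one of A's groups and one of B's (key, group) items
def GrpR (g : List Int) (p : Int × List Int) : Prop :=
  g.Nodup ∧ p.2.Nodup ∧ ∀ x, x ∈ g ↔ x ∈ p.2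

-- loop invariant: A's group list corresponds to B's groups dict in order, keys are
-- unique and < i, and comp maps x to gid exactly when x lies in the group keyed gid
def InvAB (grupos : List (PySem.Set Int)) (comp : PySem.Dict Int Int)
    (groups : PySem.Dict Int (PySem.Set Int)) (i : Int) : Prop :=
  List.Forall₂ GrpR grupos groups.items
  ∧ groups.keys.Nodup
  ∧ (∀ k ∈ groups.keys, k < i)
  ∧ (∀ x gid, comp.get? x = some gid ↔ ∃ s, groups.get? gid = some s ∧ x ∈ s)

theorem forall₂_mem_left {α β : Type} {R : α → β → Prop} {l : List α} {m : List β}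
    (h : List.Forall₂ R l m) {a : α} (ha : a ∈ l) : ∃ b ∈ m, R a b := by
  induction h with
  | nil => cases ha
  | cons hR h' ih =>
    rcases List.mem_cons.mp ha with rfl | ha
    · exact ⟨_, List.mem_cons_self, hR⟩
    · obtain ⟨b, hb, hRb⟩ := ih ha
      exact ⟨b, List.mem_cons_of_mem _ hb, hRb⟩

theorem forall₂_mem_right {α β : Type} {R : α → β → Prop} {l : List α} {m : List β}
    (h : List.Forall₂ R l m) {b : β} (hb : b ∈ m) : ∃ a ∈ l, R a b := by
  induction h with
  | nil => cases hb
  | cons hR h' ih =>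
    rcases List.mem_cons.mp hb with rfl | hb
    · exact ⟨_, List.mem_cons_self, hR⟩
    · obtain ⟨a, ha, hRa⟩ := ih hb
      exact ⟨a, List.mem_cons_of_mem _ ha, hRa⟩

theorem forall₂_filter {α β : Type} {R : α → β → Prop} {l : List α} {m : List β}
    (pA : α → Bool) (pB : β → Bool) (h : List.Forall₂ R l m)
    (hp : ∀ a b, a ∈ l → b ∈ m → R a b → pA a = pB b) :
    List.Forall₂ R (l.filter pA) (m.filter pB) := by
  induction h with
  | nil => simp
  | @cons a b l' m' hR h' ih =>
    have hab := hp a b List.mem_cons_self List.mem_cons_self hR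
    have ih' := ih (fun a' b' ha hb => hp a' b' (List.mem_cons_of_mem _ ha) (List.mem_cons_of_mem _ hb))
    by_cases hb : pB b = true
    · rw [List.filter_cons_of_pos (by rw [hab]; exact hb), List.filter_cons_of_pos hb]
      exact List.Forall₂.cons hR ih'
    · rw [List.filter_cons_of_neg (by rw [hab]; simpa using hb), List.filter_cons_of_neg (by simpa using hb)]
      exact ih'

theorem forall₂_pairwise {α β : Type} {R : α → β → Prop} {P : β → β → Prop} {Q : α → α → Prop}
    {l : List α} {m : List β} (h : List.Forall₂ R l m) (hm : m.Pairwise P)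
    (himp : ∀ a b a' b', R a b → R a' b' → P b b' → Q a a') : l.Pairwise Q := by
  induction h with
  | nil => exact List.Pairwise.nil
  | @cons a b l' m' hR h' ih =>
    rcases hm with _ | ⟨hhead, htail⟩
    refine List.Pairwise.cons (fun a' ha' => ?_) (ih htail)
    obtain ⟨b', hb', hRb'⟩ := forall₂_mem_left h' ha'
    exact himp a b a' b' hR hRb' (hhead b' hb')

theorem forall₂_append {α β : Type} {R : α → β → Prop} {l1 u1 : List α} {l2 u2 : List β}
    (h : List.Forall₂ R l1 l2) (h' : List.Forall₂ R u1 u2) :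
    List.Forall₂ R (l1 ++ u1) (l2 ++ u2) := by
  induction h with
  | nil => exact h'
  | cons hR h2 ih => exact List.Forall₂.cons hR ih

theorem max?_foldl_mem {α : Type} (key : α → Int) :
    ∀ (xs : List α) (o : Option α) (m : α),
      xs.foldl (fun acc x => match acc with
        | none => some x
        | some mm => if key mm < key x then some x else some mm) o = some m →
      o = some m ∨ m ∈ xs := by
  intro xs
  induction xs with
  | nil => intro o m h; exact Or.inl h
  | cons x xs ih =>
    intro o m h
    rcases ih _ m h with h' | h'
    · cases o with
      | none => simp at h'; right; simp [h']
      | some mm =>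
        by_cases hlt : key mm < key x
        · simp [hlt] at h'; right; simp [h']
        · simp [hlt] at h'; left; simp [h']
    · right; exact List.mem_cons_of_mem _ h'

theorem maxD_mem (xs : List Int) (key : Int → Int) (d : Int) (h : xs ≠ []) :
    PySem.List.maxD xs key d ∈ xs := by
  cases xs with
  | nil => exact absurd rfl h
  | cons x xs =>
    -- max? (x :: xs) = foldl f (some x) xs, which is some
    have : ∃ m, PySem.List.max? (x :: xs) key = some m := by
      clear h
      simp only [PySem.List.max?, List.foldl_cons]
      induction xs generalizing x with
      | nil => exact ⟨x, rfl⟩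
      | cons y ys ih =>
        simp only [List.foldl_cons]
        by_cases hlt : key x < key y
        · simpa [hlt] using ih y
        · simpa [hlt] using ih x
    obtain ⟨m, hm⟩ := this
    have := max?_foldl_mem key (x :: xs) none m (by simpa [PySem.List.max?] using hm)
    simp only [PySem.List.maxD, hm, Option.getD_some]
    rcases this with h' | h'
    · cases h'
    · exact h'

theorem get?_erase {ν : Type} (d : PySem.Dict Int ν) (k j : Int) :
    (d.erase k).get? j = if j = k then none else d.get? j := by
  obtain ⟨l⟩ := d
  induction l with
  | nil => simp [PySem.Dict.erase, PySem.Dict.get?]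
  | cons q rest ih =>
    simp only [PySem.Dict.erase, PySem.Dict.get?, PySem.Dict.items, List.filter_cons] at ih ⊢
    by_cases hqk : q.1 = k
    · by_cases hj : j = k
      · simpa [hqk, hj] using ih
      · have hkj : (k == j) = false := beq_eq_false_iff_ne.mpr (fun h => hj h.symm)
        simpa [hqk, hj, hkj] using ih
    · by_cases hqj : q.1 = j
      · by_cases hj : j = k <;> simp_all
      · by_cases hj : j = k <;> simpa [hqk, hqj, hj] using ih

theorem getD_erase (d : PySem.Dict Int (PySem.Set Int)) (k j : Int) :
    (d.erase k).getD j PySem.Set.empty =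
      if j = k then PySem.Set.empty else d.getD j PySem.Set.empty := by
  rw [PySem.Dict.getD_eq_get?_getD, get?_erase]
  by_cases h : j = k <;> simp [h, PySem.Dict.getD_eq_get?_getD]

set_option maxHeartbeats 1000000 in
theorem find?_fused {ν : Type} (p : Int × ν → Bool) (k : Int) :
    ∀ (l : List (Int × ν)), (l.map Prod.fst).Nodup →
      l.find? (fun a => p a && (a.1 == k)) = (l.find? (fun a => a.1 == k)).bind
        (fun q => if p q then some q else none) := by
  intro l
  induction l with
  | nil => simp
  | cons q rest ih =>
    intro hnd
    simp only [List.map_cons, List.nodup_cons] at hnd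
    by_cases hqk : q.1 = k
    · by_cases hp : p q = true
      · simp [hp, hqk]
      · have hnone : rest.find? (fun a => p a && (a.1 == k)) = none := by
          rw [List.find?_eq_none]
          intro a ha
          have hm := List.mem_map_of_mem (f := Prod.fst) ha
          have : a.1 ≠ k := by intro h; rw [h, ← hqk] at hm; exact hnd.1 hm
          simp [this]
        simp [hp, hqk, hnone]
    · simp [hqk, ih hnd.2]
theorem get?_mk_filter {ν : Type} (l : List (Int × ν)) (p : Int × ν → Bool) (k : Int)
    (hnd : (l.map Prod.fst).Nodup) :
    (PySem.Dict.mk (l.filter p)).get? k =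
      ((PySem.Dict.mk l).get? k).bind (fun v => if p (k, v) then some v else none) := by
  simp only [PySem.Dict.get?, PySem.Dict.items]
  rw [List.find?_filter]
  have hpred : (fun (a : Int × ν) => decide (p a = true ∧ (a.1 == k) = true)) =
      (fun a => p a && (a.1 == k)) := by
    funext a; by_cases h1 : p a = true <;> by_cases h2 : (a.1 == k) = true <;> simp [h1, h2]
  rw [hpred, find?_fused p k l hnd]
  cases hf : l.find? (fun a => a.1 == k) with
  | none => simp
  | some q =>
    have hq : q.1 = k := by simpa using List.find?_some hf
    have hq2 : (k, q.2) = q := by cases q; simp_all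
    by_cases hp : p q = true <;> simp [hp, hq2]
theorem get?_foldl_insert_const (l : List Int) (c : PySem.Dict Int Int) (v j : Int) :
    (l.foldl (fun c x => c.insert x v) c).get? j = if j ∈ l then some v else c.get? j := by
  induction l generalizing c with
  | nil => simp
  | cons x xs ih =>
    simp only [List.foldl_cons, ih, PySem.Dict.get?_insert]
    by_cases hj : j ∈ xs
    · simp [hj]
    · by_cases hx : j = x <;> simp [hj, hx]

-- A's inner loop: under pairwise-disjoint groups, it keeps exactly the groups disjoint
-- from the sublist and unions the rest into the accumulator set
theorem innerA_spec (S0 : List Int) :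
    ∀ (grupos : List (PySem.Set Int)) (S : PySem.Set Int) (acc : List (PySem.Set Int)),
      grupos.Pairwise (fun g g' => ∀ x, x ∈ g → x ∈ g' → False) →
      (∀ g ∈ grupos, ((∃ x, x ∈ S ∧ x ∈ g) ↔ (∃ x, x ∈ S0 ∧ x ∈ g))) →
      S.Nodup →
      (let r := grupos.foldl
          (fun (st : PySem.Set Int × List (PySem.Set Int)) grupo =>
            if PySem.Set.inter st.1 grupo ≠ [] then
              (PySem.Set.union st.1 grupo, st.2)
            else
              (st.1, st.2 ++ [grupo])) (S, acc);
        r.2 = acc ++ grupos.filter (fun g => decide (∀ x ∈ g, x ∉ S0))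
        ∧ r.1.Nodup
        ∧ (∀ x, x ∈ r.1 ↔ x ∈ S ∨ ∃ g, g ∈ grupos ∧ (∃ y, y ∈ S0 ∧ y ∈ g) ∧ x ∈ g)) := by
  intro grupos
  induction grupos with
  | nil =>
    intro S acc _ _ hnd
    exact ⟨by simp, hnd, by simp⟩
  | cons g rest ih =>
    intro S acc hdisj hS hnd
    rcases List.pairwise_cons.mp hdisj with ⟨hdg, hdrest⟩
    have hiter : (PySem.Set.inter S g ≠ []) ↔ ∃ x, x ∈ S ∧ x ∈ g := by
      rw [Ne, List.eq_nil_iff_forall_not_mem]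
      push_neg
      constructor
      · rintro ⟨x, hx⟩; exact ⟨x, (PySem.Set.mem_inter S g x).mp hx⟩
      · rintro ⟨x, hx⟩; exact ⟨x, (PySem.Set.mem_inter S g x).mpr hx⟩
    have hheadS0 : (∃ x, x ∈ S ∧ x ∈ g) ↔ (∃ x, x ∈ S0 ∧ x ∈ g) := hS g List.mem_cons_self
    simp only [List.foldl_cons]
    by_cases hint : PySem.Set.inter S g ≠ []
    · rw [if_pos hint]
      have hin : ∃ x, x ∈ S0 ∧ x ∈ g := hheadS0.mp (hiter.mp hint)
      have hS' : ∀ g' ∈ rest, ((∃ x, x ∈ PySem.Set.union S g ∧ x ∈ g') ↔ (∃ x, x ∈ S0 ∧ x ∈ g')) := by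
        intro g' hg'
        rw [← hS g' (List.mem_cons_of_mem _ hg')]
        constructor
        · rintro ⟨x, hx1, hx2⟩
          rcases (PySem.Set.mem_union S g x).mp hx1 with h | h
          · exact ⟨x, h, hx2⟩
          · exact absurd hx2 (fun h2 => hdg g' hg' x h h2)
        · rintro ⟨x, hx1, hx2⟩
          exact ⟨x, (PySem.Set.mem_union S g x).mpr (Or.inl hx1), hx2⟩
      obtain ⟨h1, h2, h3⟩ := ih (PySem.Set.union S g) acc hdrest hS' (PySem.Set.nodup_union S g hnd)
      have hpg : (decide (∀ x ∈ g, x ∉ S0)) = false := by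
        simp only [decide_eq_false_iff_not]
        push_neg
        obtain ⟨y, hy1, hy2⟩ := hin
        exact ⟨y, hy2, hy1⟩
      refine ⟨by rw [h1, List.filter_cons_of_neg (by simp [hpg])], h2, ?_⟩
      intro x
      rw [h3 x]
      constructor
      · rintro (h | ⟨g', hg', hw, hx⟩)
        · rcases (PySem.Set.mem_union S g x).mp h with h | h
          · exact Or.inl h
          · exact Or.inr ⟨g, List.mem_cons_self, hin, h⟩
        · exact Or.inr ⟨g', List.mem_cons_of_mem _ hg', hw, hx⟩
      · rintro (h | ⟨g', hg', hw, hx⟩)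
        · exact Or.inl ((PySem.Set.mem_union S g x).mpr (Or.inl h))
        · rcases List.mem_cons.mp hg' with rfl | hg'
          · exact Or.inl ((PySem.Set.mem_union S g' x).mpr (Or.inr hx))
          · exact Or.inr ⟨g', hg', hw, hx⟩
    · rw [if_neg hint]
      have hnotin : ¬ ∃ x, x ∈ S0 ∧ x ∈ g := fun h => hint (hiter.mpr (hheadS0.mpr h))
      have hS' : ∀ g' ∈ rest, ((∃ x, x ∈ S ∧ x ∈ g') ↔ (∃ x, x ∈ S0 ∧ x ∈ g')) :=
        fun g' hg' => hS g' (List.mem_cons_of_mem _ hg')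
      obtain ⟨h1, h2, h3⟩ := ih S (acc ++ [g]) hdrest hS' hnd
      have hpg : (decide (∀ x ∈ g, x ∉ S0)) = true := by
        simp only [decide_eq_true_eq]
        intro x hx hxS0
        exact hnotin ⟨x, hxS0, hx⟩
      refine ⟨by rw [h1, List.filter_cons_of_pos (p := fun g => decide (∀ x ∈ g, x ∉ S0)) hpg]; simp, h2, ?_⟩
      intro x
      rw [h3 x]
      constructor
      · rintro (h | ⟨g', hg', hw, hx⟩)
        · exact Or.inl h
        · exact Or.inr ⟨g', List.mem_cons_of_mem _ hg', hw, hx⟩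
      · rintro (h | ⟨g', hg', hw, hx⟩)
        · exact Or.inl h
        · rcases List.mem_cons.mp hg' with rfl | hg'
          · exact absurd hw hnotin
          · exact Or.inr ⟨g', hg', hw, hx⟩
set_option maxHeartbeats 1000000 in
theorem relabel_spec (big : Int) :
    ∀ (gids : List Int) (comp : PySem.Dict Int Int) (groups : PySem.Dict Int (PySem.Set Int))
      (m : PySem.Set Int),
      gids.Nodup →
      (let q := gids.foldl
          (fun (q : PySem.Dict Int Int × PySem.Dict Int (PySem.Set Int) × PySem.Set Int) gid =>
            if gid = big then q
            else
              let parte := q.2.1.getD gid PySem.Set.empty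
              (parte.foldl (fun c x => c.insert x big) q.1,
               q.2.1.erase gid,
               PySem.Set.union q.2.2 parte)) (comp, groups, m);
        q.2.1 = PySem.Dict.mk (groups.items.filter (fun p => decide (p.1 ∉ gids ∨ p.1 = big)))
        ∧ (∀ x, x ∈ q.2.2 ↔ x ∈ m ∨ ∃ gid, gid ∈ gids ∧ gid ≠ big ∧ x ∈ groups.getD gid PySem.Set.empty)
        ∧ (∀ j, (∃ gid, gid ∈ gids ∧ gid ≠ big ∧ j ∈ groups.getD gid PySem.Set.empty) → q.1.get? j = some big)
        ∧ (∀ j, ¬ (∃ gid, gid ∈ gids ∧ gid ≠ big ∧ j ∈ groups.getD gid PySem.Set.empty) → q.1.get? j = comp.get? j)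
        ∧ (m.Nodup → q.2.2.Nodup)) := by
  intro gids
  induction gids with
  | nil =>
    intro comp groups m _
    refine ⟨?_, by simp, by simp, fun j _ => rfl, fun h => h⟩
    apply PySem.Dict.ext
    simp [List.filter_eq_self]
  | cons gid rest ih =>
    intro comp groups m hnd
    rcases List.nodup_cons.mp hnd with ⟨hgr, hndr⟩
    simp only [List.foldl_cons]
    by_cases hgb : gid = big
    · rw [if_pos hgb]
      subst hgb
      obtain ⟨h1, h2, h3, h4, h5⟩ := ih comp groups m hndr
      have hC : ∀ j, (∃ g, g ∈ gid :: rest ∧ g ≠ gid ∧ j ∈ groups.getD g PySem.Set.empty) ↔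
          (∃ g, g ∈ rest ∧ g ≠ gid ∧ j ∈ groups.getD g PySem.Set.empty) := by
        intro j
        constructor
        · rintro ⟨g, hg, hgb', hj⟩
          rcases List.mem_cons.mp hg with rfl | hg
          · exact absurd rfl hgb'
          · exact ⟨g, hg, hgb', hj⟩
        · rintro ⟨g, hg, hgb', hj⟩
          exact ⟨g, List.mem_cons_of_mem _ hg, hgb', hj⟩
      refine ⟨?_, ?_, ?_, ?_, h5⟩
      · rw [h1]
        congr 1
        apply List.filter_congr
        intro p _
        by_cases hp : p.1 ∈ rest <;> by_cases hpb : p.1 = gid <;> simp [hp, hpb]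
      · intro x; rw [h2 x, hC x]
      · intro j hj; exact h3 j ((hC j).mp hj)
      · intro j hj; exact h4 j (fun h => hj ((hC j).mpr h))
    · rw [if_neg hgb]
      obtain ⟨h1, h2, h3, h4, h5⟩ :=
        ih (((groups.getD gid PySem.Set.empty).foldl (fun c x => c.insert x big) comp))
          (groups.erase gid)
          (PySem.Set.union m (groups.getD gid PySem.Set.empty)) hndr
      have hgetD : ∀ g, g ∈ rest → (groups.erase gid).getD g PySem.Set.empty = groups.getD g PySem.Set.empty := by
        intro g hg
        rw [getD_erase]
        have hne : ¬ (g = gid) := by rintro rfl; exact hgr hg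
        rw [if_neg hne]
      have hC : ∀ j, (∃ g, g ∈ gid :: rest ∧ g ≠ big ∧ j ∈ groups.getD g PySem.Set.empty) ↔
          (j ∈ groups.getD gid PySem.Set.empty ∨
            ∃ g, g ∈ rest ∧ g ≠ big ∧ j ∈ (groups.erase gid).getD g PySem.Set.empty) := by
        intro j
        constructor
        · rintro ⟨g, hg, hgb', hj⟩
          rcases List.mem_cons.mp hg with rfl | hg
          · exact Or.inl hj
          · exact Or.inr ⟨g, hg, hgb', (hgetD g hg).symm ▸ hj⟩
        · rintro (h | ⟨g, hg, hgb', hj⟩)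
          · exact ⟨gid, List.mem_cons_self, hgb, h⟩
          · exact ⟨g, List.mem_cons_of_mem _ hg, hgb', (hgetD g hg) ▸ hj⟩
      refine ⟨?_, ?_, ?_, ?_, ?_⟩
      · rw [h1]
        congr 1
        simp only [PySem.Dict.erase, PySem.Dict.items]
        rw [List.filter_filter]
        apply List.filter_congr
        intro p _
        by_cases hp : p.1 ∈ rest <;> by_cases hpb : p.1 = big <;> by_cases hpg : p.1 = gid <;>
          simp_all
      · intro x
        rw [h2 x, hC x]
        rw [PySem.Set.mem_union, or_assoc]
      · intro j hj
        rcases (hC j).mp hj with h | h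
        · by_cases hr : ∃ g, g ∈ rest ∧ g ≠ big ∧ j ∈ (groups.erase gid).getD g PySem.Set.empty
          · exact h3 j hr
          · rw [h4 j hr, get?_foldl_insert_const, if_pos h]
        · exact h3 j h
      · intro j hj
        have hnot : ¬ ∃ g, g ∈ rest ∧ g ≠ big ∧ j ∈ (groups.erase gid).getD g PySem.Set.empty :=
          fun h => hj ((hC j).mpr (Or.inr h))
        have hnp : j ∉ groups.getD gid PySem.Set.empty :=
          fun h => hj ((hC j).mpr (Or.inl h))
        rw [h4 j hnot, get?_foldl_insert_const, if_neg hnp]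
      · intro hmnd
        exact h5 (PySem.Set.nodup_union m _ hmnd)
theorem absorb_spec (big : Int) :
    ∀ (l : List Int) (c : PySem.Dict Int Int) (m : PySem.Set Int),
      (let r := l.foldl
          (fun (r : PySem.Dict Int Int × PySem.Set Int) x =>
            if PySem.Set.contains r.2 x then r
            else (r.1.insert x big, PySem.Set.add r.2 x)) (c, m);
        (∀ x, x ∈ r.2 ↔ x ∈ m ∨ x ∈ l)
        ∧ (m.Nodup → r.2.Nodup)
        ∧ (∀ j, (j ∈ l ∧ j ∉ m) → r.1.get? j = some big)
        ∧ (∀ j, ¬ (j ∈ l ∧ j ∉ m) → r.1.get? j = c.get? j)) := by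
  intro l
  induction l with
  | nil =>
    intro c m
    refine ⟨by simp, fun h => h, by simp, fun j _ => rfl⟩
  | cons x rest ih =>
    intro c m
    simp only [List.foldl_cons]
    by_cases hx : x ∈ m
    · have hc : PySem.Set.contains m x = true := by simpa [PySem.Set.contains, List.elem_iff] using hx
      rw [if_pos hc]
      obtain ⟨h1, h2, h3, h4⟩ := ih c m
      refine ⟨?_, h2, ?_, ?_⟩
      · intro y
        rw [h1 y]
        constructor
        · rintro (h | h) <;> simp [h]
        · rintro (h | h)
          · exact Or.inl h
          · rcases List.mem_cons.mp h with rfl | h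
            · exact Or.inl hx
            · exact Or.inr h
      · intro j ⟨hj1, hj2⟩
        rcases List.mem_cons.mp hj1 with rfl | hj1
        · exact absurd hx hj2
        · exact h3 j ⟨hj1, hj2⟩
      · intro j hj
        refine h4 j (fun ⟨hj1, hj2⟩ => hj ⟨List.mem_cons_of_mem _ hj1, hj2⟩)
    · rw [if_neg (by simpa [PySem.Set.contains] using hx)]
      obtain ⟨h1, h2, h3, h4⟩ := ih (c.insert x big) (PySem.Set.add m x)
      have hmadd : ∀ y, y ∈ PySem.Set.add m x ↔ y ∈ m ∨ y = x := PySem.Set.mem_add m x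
      refine ⟨?_, fun hnd => h2 (PySem.Set.nodup_add m x hnd), ?_, ?_⟩
      · intro y
        rw [h1 y, hmadd y]
        constructor
        · rintro ((h | h) | h)
          · exact Or.inl h
          · exact Or.inr (h ▸ List.mem_cons_self)
          · exact Or.inr (List.mem_cons_of_mem _ h)
        · rintro (h | h)
          · exact Or.inl (Or.inl h)
          · rcases List.mem_cons.mp h with rfl | h
            · exact Or.inl (Or.inr rfl)
            · exact Or.inr h
      · intro j ⟨hj1, hj2⟩
        rcases List.mem_cons.mp hj1 with rfl | hj1
        · -- j = x, x ∉ m : not in rest∧∉m', so h4 then insert-self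
          by_cases hr : j ∈ rest ∧ j ∉ PySem.Set.add m j
          · exact h3 j hr
          · rw [h4 j hr, PySem.Dict.get?_insert]
            simp
        · by_cases hjx : j = x
          · subst hjx
            by_cases hr : j ∈ rest ∧ j ∉ PySem.Set.add m j
            · exact h3 j hr
            · rw [h4 j hr, PySem.Dict.get?_insert]; simp
          · have hj2' : j ∉ PySem.Set.add m x := by
              rw [hmadd]; rintro (h | h); exact hj2 h; exact hjx h
            exact h3 j ⟨hj1, hj2'⟩
      · intro j hj
        have hjx : j ≠ x := by rintro rfl; exact hj ⟨List.mem_cons_self, hx⟩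
        have : ¬ (j ∈ rest ∧ j ∉ PySem.Set.add m x) := by
          rintro ⟨hj1, hj2⟩
          refine hj ⟨List.mem_cons_of_mem _ hj1, fun hjm => hj2 ?_⟩
          rw [hmadd]; exact Or.inl hjm
        rw [h4 j this, PySem.Dict.get?_insert, if_neg hjx]
set_option maxHeartbeats 2000000 in
theorem step_inv (l : List Int) (i : Int) (grupos : List (PySem.Set Int))
    (comp : PySem.Dict Int Int) (groups : PySem.Dict Int (PySem.Set Int))
    (h : InvAB grupos comp groups i) :
    InvAB (stepA grupos l) (stepB (comp, groups) (i, l)).1 (stepB (comp, groups) (i, l)).2 (i + 1) := by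
  obtain ⟨h1, h2, h3, h4⟩ := h
  have hkeys_def : groups.keys = groups.items.map Prod.fst := rfl
  unfold stepA stepB
  dsimp only
  set S0 : PySem.Set Int := PySem.Set.ofList l with hS0
  set gids : List Int := PySem.List.dedup (l.filterMap (fun x => comp.get? x)) with hgids
  set big : Int := if gids ≠ [] then
      PySem.List.maxD gids (fun g => ((groups.getD g PySem.Set.empty).length : Int)) 0
    else i with hbigdef
  set merged0 : PySem.Set Int := groups.getD big PySem.Set.empty with hmerged0
  set groups1 : PySem.Dict Int (PySem.Set Int) := groups.erase big with hgroups1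
  set rA := grupos.foldl
      (fun (st : PySem.Set Int × List (PySem.Set Int)) grupo =>
        if PySem.Set.inter st.1 grupo ≠ [] then
          (PySem.Set.union st.1 grupo, st.2)
        else
          (st.1, st.2 ++ [grupo])) (S0, []) with hrA
  set q := gids.foldl
      (fun (q : PySem.Dict Int Int × PySem.Dict Int (PySem.Set Int) × PySem.Set Int) gid =>
        if gid = big then q
        else
          let parte := q.2.1.getD gid PySem.Set.empty
          (parte.foldl (fun c x => c.insert x big) q.1,
           q.2.1.erase gid,
           PySem.Set.union q.2.2 parte)) (comp, groups1, merged0) with hq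
  set r := l.foldl
      (fun (r : PySem.Dict Int Int × PySem.Set Int) x =>
        if PySem.Set.contains r.2 x then r
        else (r.1.insert x big, PySem.Set.add r.2 x)) (q.1, q.2.2) with hr
  -- basic facts
  have hmemS0 : ∀ x, x ∈ S0 ↔ x ∈ l := fun x => PySem.Set.mem_ofList l x
  have hgid : ∀ g, g ∈ gids ↔ ∃ x, x ∈ l ∧ comp.get? x = some g := by
    intro g
    rw [hgids, PySem.List.mem_dedup, List.mem_filterMap]
  have hvnd : ∀ p ∈ groups.items, (p.2 : List Int).Nodup := by
    intro p hp
    obtain ⟨g, _, ⟨_, hnd2, _⟩⟩ := forall₂_mem_right h1 hp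
    exact hnd2
  have hbig : (gids ≠ [] ∧ big ∈ gids) ∨ (gids = [] ∧ big = i) := by
    by_cases hng : gids = []
    · right
      exact ⟨hng, by rw [hbigdef, if_neg (by simp [hng])]⟩
    · left
      refine ⟨hng, ?_⟩
      rw [hbigdef, if_pos hng]
      exact maxD_mem gids _ 0 hng
  have hkey_of_gid : ∀ g ∈ gids, ∃ s, groups.get? g = some s := by
    intro g hg
    obtain ⟨x, _, hx⟩ := (hgid g).mp hg
    obtain ⟨s, hs, _⟩ := (h4 x g).mp hx
    exact ⟨s, hs⟩
  have hfresh : gids = [] → groups.get? i = none := by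
    intro hng
    rw [PySem.Dict.get?_eq_none_iff_not_mem_keys]
    intro hmem
    exact absurd (h3 i hmem) (lt_irrefl i)
  have hmemkeys : ∀ (g : Int) (s : PySem.Set Int), groups.get? g = some s → g ∈ groups.keys := by
    intro g s hs
    by_contra hn
    rw [← PySem.Dict.get?_eq_none_iff_not_mem_keys] at hn
    rw [hn] at hs
    cases hs
  have hgetDsome : ∀ (g : Int) (s : PySem.Set Int), groups.get? g = some s →
      groups.getD g PySem.Set.empty = s := by
    intro g s hgs
    rw [PySem.Dict.getD_eq_get?_getD, hgs]
    rfl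
  -- pairwise disjointness of the stored groups, then of A's groups
  have hdisjI : groups.items.Pairwise (fun p p' => ∀ x, x ∈ p.2 → x ∈ p'.2 → False) := by
    have hkeysnd : groups.items.Pairwise (fun p p' => p.1 ≠ p'.1) := by
      have h2' := h2
      rw [hkeys_def] at h2'
      exact List.pairwise_map.mp h2'
    refine List.Pairwise.imp_of_mem ?_ hkeysnd
    intro p p' hp hp' hne x hx hx'
    have e1 : groups.get? p.1 = some p.2 := PySem.Dict.get?_of_mem_items groups (by simpa using hp) h2
    have e2 : groups.get? p'.1 = some p'.2 := PySem.Dict.get?_of_mem_items groups (by simpa using hp') h2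
    have c1 : comp.get? x = some p.1 := (h4 x p.1).mpr ⟨p.2, e1, hx⟩
    have c2 : comp.get? x = some p'.1 := (h4 x p'.1).mpr ⟨p'.2, e2, hx'⟩
    exact hne (Option.some.inj (c1.symm.trans c2))
  have hdisjG : grupos.Pairwise (fun g g' => ∀ x, x ∈ g → x ∈ g' → False) := by
    refine forall₂_pairwise h1 hdisjI ?_
    rintro a b a' b' ⟨_, _, hm⟩ ⟨_, _, hm'⟩ hP x hx hx'
    exact hP x ((hm x).mp hx) ((hm' x).mp hx')
  obtain ⟨hA1, hA2, hA3⟩ := innerA_spec S0 grupos S0 [] hdisjG (fun g _ => Iff.rfl)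
    (by rw [hS0]; exact PySem.Set.nodup_ofList l)
  rw [← hrA] at hA1 hA2 hA3
  rw [List.nil_append] at hA1
  -- a stored key is touched iff its group meets the sublist
  have hkeygid : ∀ p ∈ groups.items, (p.1 ∈ gids ↔ ∃ y, y ∈ l ∧ y ∈ p.2) := by
    intro p hp
    have hg? : groups.get? p.1 = some p.2 := PySem.Dict.get?_of_mem_items groups (by simpa using hp) h2
    rw [hgid]
    constructor
    · rintro ⟨x, hxl, hxc⟩
      obtain ⟨s, hs, hxs⟩ := (h4 x p.1).mp hxc
      have hps : p.2 = s := Option.some.inj (hg?.symm.trans hs)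
      rw [← hps] at hxs
      exact ⟨x, hxl, hxs⟩
    · rintro ⟨y, hyl, hyp⟩
      exact ⟨y, hyl, (h4 y p.1).mpr ⟨p.2, hg?, hyp⟩⟩
  have htouch : ∀ x, (∃ g, g ∈ gids ∧ g ≠ big ∧ x ∈ groups1.getD g PySem.Set.empty) ↔
      (∃ g, g ∈ gids ∧ g ≠ big ∧ x ∈ groups.getD g PySem.Set.empty) := by
    intro x
    constructor <;> rintro ⟨g, hg, hgb, hx⟩ <;> refine ⟨g, hg, hgb, ?_⟩
    · rwa [hgroups1, getD_erase, if_neg hgb] at hx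
    · rwa [hgroups1, getD_erase, if_neg hgb]
  have hUni : ∀ x, (x ∈ merged0 ∨ ∃ g, g ∈ gids ∧ g ≠ big ∧ x ∈ groups1.getD g PySem.Set.empty) ↔
      (∃ g, g ∈ gids ∧ x ∈ groups.getD g PySem.Set.empty) := by
    intro x
    rw [htouch x]
    constructor
    · rintro (hx | ⟨g, hg, _, hx⟩)
      · rcases hbig with ⟨_, hbg⟩ | ⟨hng, hbi⟩
        · exact ⟨big, hbg, hx⟩
        · exfalso
          rw [hmerged0, PySem.Dict.getD_eq_get?_getD, hbi, hfresh hng] at hx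
          simp [PySem.Set.empty] at hx
      · exact ⟨g, hg, hx⟩
    · rintro ⟨g, hg, hx⟩
      by_cases hgb : g = big
      · left
        rw [hmerged0, ← hgb]
        exact hx
      · right
        exact ⟨g, hg, hgb, hx⟩
  obtain ⟨hB1, hB2, hB3, hB4, hB5⟩ := relabel_spec big gids comp groups1 merged0
    (by rw [hgids]; exact PySem.List.nodup_dedup _)
  rw [← hq] at hB1 hB2 hB3 hB4 hB5
  obtain ⟨hC1, hC2, hC3, hC4⟩ := absorb_spec big l q.1 q.2.2
  rw [← hr] at hC1 hC2 hC3 hC4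
  have hM : ∀ x, x ∈ r.2 ↔ x ∈ l ∨ ∃ g, g ∈ gids ∧ x ∈ groups.getD g PySem.Set.empty := by
    intro x
    rw [hC1 x, hB2 x]
    constructor
    · rintro ((hx | hx) | hx)
      · exact Or.inr ((hUni x).mp (Or.inl hx))
      · exact Or.inr ((hUni x).mp (Or.inr hx))
      · exact Or.inl hx
    · rintro (hx | hx)
      · exact Or.inr hx
      · rcases (hUni x).mpr hx with h' | h'
        · exact Or.inl (Or.inl h')
        · exact Or.inl (Or.inr h')
  have hmerged0nd : merged0.Nodup := by
    rw [hmerged0, PySem.Dict.getD_eq_get?_getD]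
    cases hg : groups.get? big with
    | none => simp [PySem.Set.empty]
    | some s =>
      simp only [Option.getD_some]
      exact hvnd (big, s) (PySem.Dict.mem_items_of_get?_eq_some groups hg)
  have hMnd : r.2.Nodup := hC2 (hB5 hmerged0nd)
  have hAM : GrpR rA.1 (big, r.2) := by
    refine ⟨hA2, hMnd, ?_⟩
    intro x
    rw [hA3 x, hM x]
    constructor
    · rintro (hx | ⟨g, hg, ⟨y, hyS0, hyg⟩, hxg⟩)
      · exact Or.inl ((hmemS0 x).mp hx)
      · obtain ⟨p, hp, ⟨_, _, hmgp⟩⟩ := forall₂_mem_left h1 hg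
        have hg? : groups.get? p.1 = some p.2 :=
          PySem.Dict.get?_of_mem_items groups (by simpa using hp) h2
        refine Or.inr ⟨p.1, (hkeygid p hp).mpr ⟨y, (hmemS0 y).mp hyS0, (hmgp y).mp hyg⟩, ?_⟩
        rw [hgetDsome p.1 p.2 hg?]
        exact (hmgp x).mp hxg
    · rintro (hx | ⟨g, hg, hxg⟩)
      · exact Or.inl ((hmemS0 x).mpr hx)
      · obtain ⟨s, hs⟩ := hkey_of_gid g hg
        rw [hgetDsome g s hs] at hxg
        have hitems : (g, s) ∈ groups.items := PySem.Dict.mem_items_of_get?_eq_some groups hs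
        obtain ⟨a, ha, ⟨_, _, hma⟩⟩ := forall₂_mem_right h1 hitems
        obtain ⟨y, hyl, hyc⟩ := (hgid g).mp hg
        obtain ⟨s', hs', hys'⟩ := (h4 y g).mp hyc
        have hss : s' = s := Option.some.inj (hs'.symm.trans hs)
        rw [hss] at hys'
        exact Or.inr ⟨a, ha, ⟨y, (hmemS0 y).mpr hyl, (hma y).mpr hys'⟩, (hma x).mpr hxg⟩
  -- the new dict's items
  have hq21items : q.2.1.items =
      groups.items.filter (fun p => decide (p.1 ∉ gids ∧ p.1 ≠ big)) := by
    rw [hB1, hgroups1]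
    simp only [PySem.Dict.items, PySem.Dict.erase]
    rw [List.filter_filter]
    apply List.filter_congr
    intro p _
    by_cases hpb : p.1 = big <;> by_cases hpg : p.1 ∈ gids <;> simp [hpb, hpg]
  have hcontains_big : q.2.1.contains big = false := by
    show q.2.1.items.any (fun p => p.1 == big) = false
    rw [hq21items, List.any_eq_false]
    intro p hp
    have := (List.mem_filter.mp hp).2
    simp only [decide_eq_true_eq] at this
    simpa using this.2
  have hitems_new : (q.2.1.insert big r.2).items = q.2.1.items ++ [(big, r.2)] := by
    rw [PySem.Dict.items_insert, hcontains_big]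
    simp
  have hnotbig : ∀ (p : Int × PySem.Set Int), p ∈ groups.items → p.1 ∉ gids → p.1 ≠ big := by
    intro p hp hnp
    rcases hbig with ⟨_, hbg⟩ | ⟨hng, hbi⟩
    · intro he
      exact hnp (he ▸ hbg)
    · intro he
      have hmem : p.1 ∈ groups.keys := PySem.Dict.mem_keys_of_mem_items groups hp
      have := h3 p.1 hmem
      rw [he, hbi] at this
      exact absurd this (lt_irrefl i)
  have hForall : List.Forall₂ GrpR (rA.2 ++ [rA.1]) ((q.2.1.insert big r.2).items) := by
    rw [hitems_new, hA1, hq21items]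
    refine forall₂_append ?_ (List.Forall₂.cons hAM List.Forall₂.nil)
    refine forall₂_filter _ _ h1 ?_
    rintro g p hg hp ⟨_, _, hmgp⟩
    have hkg := hkeygid p hp
    have hiff : (∀ x ∈ g, x ∉ S0) ↔ (p.1 ∉ gids ∧ p.1 ≠ big) := by
      constructor
      · intro hall
        have hnp : p.1 ∉ gids := by
          rw [hkg]
          rintro ⟨y, hyl, hyp⟩
          exact hall y ((hmgp y).mpr hyp) ((hmemS0 y).mpr hyl)
        exact ⟨hnp, hnotbig p hp hnp⟩
      · rintro ⟨hnp, _⟩ x hxg hxS0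
        exact hnp (hkg.mpr ⟨x, (hmemS0 x).mp hxS0, (hmgp x).mp hxg⟩)
    exact decide_eq_decide.mpr hiff
  -- keys of the new dict
  have hkeys_new : (q.2.1.insert big r.2).keys =
      (groups.items.filter (fun p => decide (p.1 ∉ gids ∧ p.1 ≠ big))).map Prod.fst ++ [big] := by
    show ((q.2.1.insert big r.2).items).map Prod.fst = _
    rw [hitems_new, hq21items, List.map_append]
    rfl
  have hknd_new : (q.2.1.insert big r.2).keys.Nodup := by
    rw [hkeys_new, List.nodup_append]
    refine ⟨?_, List.nodup_singleton _, ?_⟩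
    · refine List.Nodup.sublist (List.Sublist.map Prod.fst List.filter_sublist) ?_
      rw [← hkeys_def]
      exact h2
    · intro a ha b hb
      have hb' : b = big := by simpa using hb
      subst hb'
      obtain ⟨p, hp, hpa⟩ := List.mem_map.mp ha
      have hf := (List.mem_filter.mp hp).2
      simp only [decide_eq_true_eq] at hf
      intro he
      exact hf.2 (hpa.trans he)
  have hbound : ∀ k ∈ (q.2.1.insert big r.2).keys, k < i + 1 := by
    intro k hk
    rw [hkeys_new, List.mem_append] at hk
    rcases hk with hk | hk
    · obtain ⟨p, hp, hpk⟩ := List.mem_map.mp hk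
      have hpm := (List.mem_filter.mp hp).1
      have := h3 p.1 (PySem.Dict.mem_keys_of_mem_items groups hpm)
      omega
    · have hk' : k = big := by simpa using hk
      rcases hbig with ⟨_, hbg⟩ | ⟨_, hbi⟩
      · obtain ⟨s, hs⟩ := hkey_of_gid big hbg
        have := h3 big (hmemkeys big s hs)
        omega
      · omega
  -- lookups in the filtered dict
  have hq21dict : q.2.1 =
      PySem.Dict.mk (groups.items.filter (fun p => decide (p.1 ∉ gids ∧ p.1 ≠ big))) := by
    apply PySem.Dict.ext
    exact hq21items
  have hq21get : ∀ (k : Int), q.2.1.get? k = (groups.get? k).bind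
      (fun v => if decide (k ∉ gids ∧ k ≠ big) then some v else none) := by
    intro k
    rw [hq21dict, get?_mk_filter _ _ k (hkeys_def ▸ h2)]
  have hins : ∀ (gid' : Int), (q.2.1.insert big r.2).get? gid' =
      if gid' = big then some r.2 else q.2.1.get? gid' := by
    intro gid'
    exact PySem.Dict.get?_insert _ _ _ _
  -- the comp correspondence for the new state
  have hcomp4 : ∀ x gid', r.1.get? x = some gid' ↔
      ∃ s, (q.2.1.insert big r.2).get? gid' = some s ∧ x ∈ s := by
    intro x gid'
    by_cases hx : x ∈ r.2
    · have hLHS : r.1.get? x = some big := by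
        by_cases hCC : x ∈ l ∧ x ∉ q.2.2
        · exact hC3 x hCC
        · rw [hC4 x hCC]
          by_cases hCB : ∃ g, g ∈ gids ∧ g ≠ big ∧ x ∈ groups1.getD g PySem.Set.empty
          · exact hB3 x hCB
          · rw [hB4 x hCB]
            have hxm0 : x ∈ merged0 := by
              rcases (hM x).mp hx with hxl | ⟨g, hg, hxg⟩
              · have hxq22 : x ∈ q.2.2 := by
                  by_contra hn
                  exact hCC ⟨hxl, hn⟩
                rcases (hB2 x).mp hxq22 with h' | h'
                · exact h'
                · exact absurd h' hCB
              · by_cases hgb : g = big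
                · rw [hmerged0, ← hgb]
                  exact hxg
                · exfalso
                  apply hCB
                  refine ⟨g, hg, hgb, ?_⟩
                  rw [hgroups1, getD_erase, if_neg hgb]
                  exact hxg
            rw [hmerged0, PySem.Dict.getD_eq_get?_getD] at hxm0
            cases hgb : groups.get? big with
            | none =>
              rw [hgb] at hxm0
              simp [PySem.Set.empty] at hxm0
            | some s =>
              rw [hgb] at hxm0
              exact (h4 x big).mpr ⟨s, hgb, by simpa using hxm0⟩
      rw [hLHS]
      constructor
      · intro hsome
        have hgb : big = gid' := Option.some.inj hsome
        subst hgb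
        exact ⟨r.2, by rw [hins, if_pos rfl], hx⟩
      · rintro ⟨s, hs, hxs⟩
        by_cases hgb : gid' = big
        · rw [hgb]
        · exfalso
          rw [hins, if_neg hgb, hq21get] at hs
          cases hgq : groups.get? gid' with
          | none =>
            rw [hgq] at hs
            simp at hs
          | some t =>
            rw [hgq] at hs
            by_cases hcond : gid' ∉ gids ∧ gid' ≠ big
            · have hts : t = s := by
                simp only [Option.bind_some, if_pos (decide_eq_true hcond)] at hs
                exact Option.some.inj hs
              have hxt : x ∈ t := hts ▸ hxs
              have hcompx : comp.get? x = some gid' := (h4 x gid').mpr ⟨t, hgq, hxt⟩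
              rcases (hM x).mp hx with hxl | ⟨g, hg, hxg⟩
              · exact hcond.1 ((hgid gid').mpr ⟨x, hxl, hcompx⟩)
              · obtain ⟨sg, hsgq⟩ := hkey_of_gid g hg
                rw [hgetDsome g sg hsgq] at hxg
                have hcg : comp.get? x = some g := (h4 x g).mpr ⟨sg, hsgq, hxg⟩
                have hgg : gid' = g := Option.some.inj (hcompx.symm.trans hcg)
                exact hcond.1 (hgg ▸ hg)
            · simp only [Option.bind_some, if_neg (by simpa using hcond : ¬ decide (gid' ∉ gids ∧ gid' ≠ big) = true)] at hs
              exact absurd hs (by simp)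
    · have hLHS : r.1.get? x = comp.get? x := by
        have hCC : ¬ (x ∈ l ∧ x ∉ q.2.2) := by
          rintro ⟨hxl, _⟩
          exact hx ((hC1 x).mpr (Or.inr hxl))
        rw [hC4 x hCC]
        have hCB : ¬ ∃ g, g ∈ gids ∧ g ≠ big ∧ x ∈ groups1.getD g PySem.Set.empty := by
          intro hcb
          exact hx ((hC1 x).mpr (Or.inl ((hB2 x).mpr (Or.inr hcb))))
        exact hB4 x hCB
      rw [hLHS, h4 x gid', hins]
      by_cases hgb : gid' = big
      · rw [if_pos hgb]
        subst hgb
        constructor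
        · rintro ⟨s, hs, hxs⟩
          exfalso
          have hxm0 : x ∈ merged0 := by
            rw [hmerged0, hgetDsome big s hs]
            exact hxs
          exact hx ((hC1 x).mpr (Or.inl ((hB2 x).mpr (Or.inl hxm0))))
        · rintro ⟨s, hs, hxs⟩
          have : r.2 = s := Option.some.inj hs
          rw [← this] at hxs
          exact absurd hxs hx
      · rw [if_neg hgb, hq21get]
        constructor
        · rintro ⟨s, hs, hxs⟩
          have hnp : gid' ∉ gids := by
            intro hin
            apply hx
            exact (hM x).mpr (Or.inr ⟨gid', hin, by rw [hgetDsome gid' s hs]; exact hxs⟩)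
          refine ⟨s, ?_, hxs⟩
          rw [hs]
          simp [hnp, hgb]
        · rintro ⟨s, hs, hxs⟩
          cases hgq : groups.get? gid' with
          | none =>
            rw [hgq] at hs
            simp at hs
          | some t =>
            rw [hgq] at hs
            by_cases hcond : gid' ∉ gids ∧ gid' ≠ big
            · have hts : t = s := by
                simp only [Option.bind_some, if_pos (decide_eq_true hcond)] at hs
                exact Option.some.inj hs
              exact ⟨t, rfl, hts ▸ hxs⟩
            · simp only [Option.bind_some, if_neg (by simpa using hcond : ¬ decide (gid' ∉ gids ∧ gid' ≠ big) = true)] at hs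
              exact absurd hs (by simp)
  exact ⟨hForall, hknd_new, hbound, hcomp4⟩

theorem outer_inv :
    ∀ (lista : List (List Int)) (i : Int) (grupos : List (PySem.Set Int))
      (comp : PySem.Dict Int Int) (groups : PySem.Dict Int (PySem.Set Int)),
      InvAB grupos comp groups i →
      List.Forall₂ GrpR (lista.foldl stepA grupos)
        (((PySem.List.enumerate lista i).foldl stepB (comp, groups)).2.items) := by
  intro lista
  induction lista with
  | nil => intro i grupos comp groups h; exact h.1
  | cons l rest ih =>
    intro i grupos comp groups h
    rw [PySem.List.enumerate_cons]
    simp only [List.foldl_cons]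
    have hstep := step_inv l i grupos comp groups h
    exact ih (i + 1) _ _ _ hstep

theorem inv_init : InvAB [] PySem.Dict.empty PySem.Dict.empty 0 := by
  refine ⟨List.Forall₂.nil, ?_, ?_, ?_⟩
  · simp [PySem.Dict.keys, PySem.Dict.empty]
  · simp [PySem.Dict.keys, PySem.Dict.empty]
  · intro x gid
    simp [PySem.Dict.get?, PySem.Dict.empty]

-- ===== VERDICT (by name: the statement is the Claim_ definition above) =====
theorem agruparEstadosComuns_spec : Claim_equal_agruparEstadosComuns := by
  intro lista _
  unfold Spec_agruparEstadosComuns agruparEstadosComuns agruparEstadosComuns_alt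
  have h := outer_inv lista 0 [] PySem.Dict.empty PySem.Dict.empty inv_init
  simp only [PySem.Dict.values]
  generalize hA : lista.foldl stepA [] = grupos at h
  generalize hB : ((PySem.List.enumerate lista 0).foldl stepB (PySem.Dict.empty, PySem.Dict.empty)).2.items = items at h
  clear hA hB
  induction h with
  | nil => rfl
  | cons hR h' ih =>
    simp only [List.map_cons, List.map_map] at ih ⊢
    obtain ⟨hnd1, hnd2, hmem⟩ := hR
    rw [PySem.List.sorted_eq_sorted_of_perm _ _ _ (fun a b hab => hab)
      ((List.perm_ext_iff_of_nodup hnd1 hnd2).mpr hmem), ih]
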